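-- pv_equiv track=rewrite | github.com/jichen20210919/ambank_airflow_dag | ds_functions.py | ds_index
-- ===== SOURCE A (Python) =====
-- def ds_index(string, substring, occurrence):
--     if string is None or substring is None or occurrence <= 0:
--         return 0
--
--     if len(substring) == 0:
--         return 1
--
--     start = 0
--     count = 0
--     while start < len(string):
--         found_index = string.find(substring, start)
--         if found_index == -1:
--             break
--         count += 1
--         if count == occurrence:
--             return found_index + 1  # +1 to convert to 1-based index
--         start = found_index + 1
--
--     return 0
-- ===== SOURCE B (Python) =====
-- def ds_index(string, substring, occurrence):
--     if string is None or substring is None or occurrence <= 0: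
--         return 0
--
--     m = len(substring)
--     if m == 0:
--         return 1
--
--     count = 0
--     active = []  # start positions of partial matches still alive
--     for pos, ch in enumerate(string):
--         active.append(pos)
--         nxt = []
--         for start in active:
--             if substring[pos - start] == ch:
--                 if pos - start + 1 == m:
--                     count += 1
--                     if count == occurrence:
--                         return start + 1
--                 else:
--                     nxt.append(start)
--         active = nxt
--     return 0
-- ===== Notes on version B (the rewrite author's own statement) =====
-- stated objective: alternative
-- what changed: Replaces the repeated str.find-and-advance while-loop with a character-at-a-time automaton scan: a single pass over the string maintaining a frontier of live partial-match start positions (extended, dropped or completed per character), never calling find/startswith or comparing whole substrings.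
import Mathlib
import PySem

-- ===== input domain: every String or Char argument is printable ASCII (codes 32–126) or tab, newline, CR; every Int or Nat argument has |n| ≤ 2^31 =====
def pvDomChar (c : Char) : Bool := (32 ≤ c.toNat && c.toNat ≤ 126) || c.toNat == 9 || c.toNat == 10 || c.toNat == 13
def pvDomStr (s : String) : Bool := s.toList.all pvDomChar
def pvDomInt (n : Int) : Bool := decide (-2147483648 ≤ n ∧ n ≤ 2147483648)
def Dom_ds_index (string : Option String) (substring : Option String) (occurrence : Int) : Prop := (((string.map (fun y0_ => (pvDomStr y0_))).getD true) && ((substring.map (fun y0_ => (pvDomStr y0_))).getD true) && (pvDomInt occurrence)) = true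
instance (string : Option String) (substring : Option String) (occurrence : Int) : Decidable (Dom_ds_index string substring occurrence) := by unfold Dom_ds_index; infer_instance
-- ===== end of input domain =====

-- B replaces A's repeated str.find-and-advance while-loop by a character-at-a-time
-- multi-candidate automaton scan (a frontier of live partial-match start positions,
-- no find/startswith/substring comparison primitive at all); same worst-case cost.

-- ===== PORT A =====
-- A's while loop: start, count; repeatedly string.find(substring, start)
def dsFindLoop (cs sub : List Char) (occurrence : Int) (start : Nat) (count : Int) : Int :=
  if h : start < cs.length then
    if hf : PySem.Chars.findFrom cs sub (start : Int) none = -1 then 0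
    else if count + 1 = occurrence then PySem.Chars.findFrom cs sub (start : Int) none + 1
    else dsFindLoop cs sub occurrence ((PySem.Chars.findFrom cs sub (start : Int) none).toNat + 1) (count + 1)
  else 0
termination_by cs.length - start
decreasing_by
  have hs := (PySem.Chars.findFrom_natCast_spec cs sub start (Nat.le_of_lt h) hf).1
  omega

def ds_index (string : Option String) (substring : Option String) (occurrence : Int) : Int :=
  match string, substring with
  | some s, some sub =>
    if occurrence ≤ 0 then 0
    else if PySem.Str.len sub = 0 then 1
    else dsFindLoop s.toList sub.toList occurrence 0 0
  | _, _ => 0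

-- ===== PORT B =====
-- B's inner for-loop over the frontier `todo` (accumulator nxt built by append, as in Source B);
-- substring[pos - start] is ported as getD: the frontier invariant keeps pos - start < m,
-- so the Python index is always in range and getD is exact there.
def dsInner (sub : List Char) (m : Nat) (occ : Int) (pos : Nat) (ch : Char) :
    Int → List Nat → List Nat → Option Int × Int × List Nat
  | count, [], nxt => (none, count, nxt)
  | count, s :: rest, nxt =>
      if sub.getD (pos - s) ' ' = ch then
        if pos - s + 1 = m then
          if count + 1 = occ then (some ((s : Int) + 1), count + 1, nxt)
          else dsInner sub m occ pos ch (count + 1) rest nxt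
        else dsInner sub m occ pos ch count rest (nxt ++ [s])
      else dsInner sub m occ pos ch count rest nxt

-- B's outer for-loop: `for pos, ch in enumerate(string)` with state (count, active)
def dsAuto (sub : List Char) (m : Nat) (occ : Int) : Int → List Nat → Nat → List Char → Int
  | _, _, _, [] => 0
  | count, active, pos, ch :: rest =>
      match dsInner sub m occ pos ch count (active ++ [pos]) [] with
      | (some r, _, _) => r
      | (none, count', nxt) => dsAuto sub m occ count' nxt (pos + 1) rest

def ds_index_alt (string : Option String) (substring : Option String) (occurrence : Int) : Int :=
  match string with
  | none => 0
  | some s =>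
    match substring with
    | none => 0
    | some sub =>
      if occurrence ≤ 0 then 0
      else if sub.toList.length = 0 then 1   -- m = len(substring); if m == 0: return 1
      else dsAuto sub.toList sub.toList.length occurrence 0 [] 0 s.toList

-- ===== PRECONDITION & SPEC =====
def Spec_ds_index (string : Option String) (substring : Option String) (occurrence : Int) (out : Int) : Prop := out = ds_index_alt string substring occurrence
instance (string : Option String) (substring : Option String) (occurrence : Int) (out : Int) : Decidable (Spec_ds_index string substring occurrence out) := by unfold Spec_ds_index; infer_instance

-- ===== CLAIM (what is proved, stated in full; the proofs are below) =====
def Claim_equal_ds_index : Prop := ∀ (string : Option String) (substring : Option String) (occurrence : Int), Dom_ds_index string substring occurrence → Spec_ds_index string substring occurrence (ds_index string substring occurrence)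

-- ===== LEMMAS AND PROOFS =====

-- Common reference: walk the (sorted) list of match start positions counting occurrences
def dsPick (occ : Int) : Int → List Nat → Int
  | _, [] => 0
  | count, s :: rest => if count + 1 = occ then (s : Int) + 1 else dsPick occ (count + 1) rest

-- a match at a position ≥ k is an infix of cs.drop k
lemma prefix_drop_infix (cs sub : List Char) (j k : Nat) (hk : k ≤ j)
    (h : sub <+: cs.drop j) : sub <:+: cs.drop k := by
  have : cs.drop j = (cs.drop k).drop (j - k) := by
    rw [List.drop_drop]; congr 1; omega
  rw [this] at h
  exact h.isInfix.trans (List.drop_suffix _ _).isInfix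

-- extending a partial match by one character (via elementwise characterisation)
lemma prefix_take_succ_iff (t sub : List Char) (k : Nat) (hk : k < sub.length) :
    sub.take (k + 1) <+: t ↔ (sub.take k <+: t ∧ t[k]? = sub[k]?) := by
  have hl1 : (sub.take (k+1)).length = k+1 := by simp; omega
  have hl0 : (sub.take k).length = k := by simp; omega
  rw [List.prefix_iff_getElem?, List.prefix_iff_getElem?]
  constructor
  · intro h
    refine ⟨fun i hi => ?_, ?_⟩
    · have := h i (by omega)
      simpa [List.getElem_take] using this
    · have := h k (by omega)
      rw [List.getElem?_eq_getElem hk]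
      simpa [List.getElem_take] using this
  · rintro ⟨h1, h2⟩ i hi
    rw [hl1] at hi
    by_cases hik : i < k
    · have := h1 i (by omega)
      simpa [List.getElem_take] using this
    · have hik' : i = k := by omega
      subst hik'
      rw [List.getElem?_eq_getElem hk] at h2
      simpa [List.getElem_take] using h2

-- pulling the minimal satisfying element out of a filtered range
lemma filter_range_eq_cons (n f : Nat) (p : Nat → Bool) (hf : f < n) (hpf : p f = true)
    (hmin : ∀ s, p s = true → f ≤ s) :
    (List.range n).filter p = f :: (List.range n).filter (fun s => p s && decide (f < s)) := by
  induction n with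
  | zero => omega
  | succ n ih =>
    rw [List.range_succ, List.filter_append, List.filter_append]
    by_cases h : f < n
    · rw [ih h]
      have : List.filter p [n] = List.filter (fun s => p s && decide (f < s)) [n] := by
        simp only [List.filter]
        by_cases hp : p n = true
        · simp [hp, h]
        · simp [Bool.eq_false_iff.mpr hp]
      rw [this, List.cons_append]
    · have hfn : f = n := by omega
      have h1 : (List.range n).filter p = [] := by
        rw [List.filter_eq_nil_iff]
        intro a ha hpa
        have := hmin a hpa
        have := List.mem_range.mp ha
        omega
      have h2 : (List.range n).filter (fun s => p s && decide (f < s)) = [] := by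
        rw [List.filter_eq_nil_iff]
        intro a ha hpa
        have := List.mem_range.mp ha
        simp only [Bool.and_eq_true, decide_eq_true_eq] at hpa
        have := hmin a hpa.1
        omega
      have h3 : List.filter p [n] = [n] := by simp [List.filter, hfn ▸ hpf]
      have h4 : List.filter (fun s => p s && decide (f < s)) [n] = [] := by
        simp [List.filter, hfn]
      rw [h1, h2, h3, h4, hfn]
      rfl

lemma findLoop_eq (cs sub : List Char) (hsub : sub ≠ []) (occ : Int) :
    ∀ d start : Nat, ∀ count : Int, cs.length - start ≤ d → start ≤ cs.length →
    dsFindLoop cs sub occ start count =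
      dsPick occ count ((List.range cs.length).filter
        (fun s => decide (start ≤ s) && sub.isPrefixOf (cs.drop s))) := by
  have hm : 1 ≤ sub.length := List.length_pos_iff.mpr hsub
  have hend : ∀ start : Nat, start = cs.length →
      (List.range cs.length).filter (fun s => decide (start ≤ s) && sub.isPrefixOf (cs.drop s)) = [] := by
    intro start hstart
    rw [List.filter_eq_nil_iff]
    intro a ha hpa
    have := List.mem_range.mp ha
    simp only [Bool.and_eq_true, decide_eq_true_eq] at hpa
    omega
  intro d
  induction d with
  | zero =>
    intro start count hd hle
    have hstart : start = cs.length := by omega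
    rw [dsFindLoop, dif_neg (by omega), hend start hstart]
    rfl
  | succ d ih =>
    intro start count hd hle
    rw [dsFindLoop]
    by_cases h : start < cs.length
    · rw [dif_pos h]
      by_cases hf : PySem.Chars.findFrom cs sub (start : Int) none = -1
      · rw [dif_pos hf]
        have hno := (PySem.Chars.findFrom_natCast_eq_neg_one_iff cs sub start (Nat.le_of_lt h)).mp hf
        have hnil : (List.range cs.length).filter (fun s => decide (start ≤ s) && sub.isPrefixOf (cs.drop s)) = [] := by
          rw [List.filter_eq_nil_iff]
          intro a _ hpa
          simp only [Bool.and_eq_true, decide_eq_true_eq, List.isPrefixOf_iff_prefix] at hpa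
          exact hno (prefix_drop_infix cs sub a start hpa.1 hpa.2)
        rw [hnil]; rfl
      · rw [dif_neg hf]
        obtain ⟨hge, hpre, hmin⟩ := PySem.Chars.findFrom_natCast_spec cs sub start (Nat.le_of_lt h) hf
        set f := PySem.Chars.findFrom cs sub (start : Int) none with hfdef
        have hf0 : (0 : Int) ≤ f := le_trans (by positivity) hge
        have hlenle : sub.length ≤ (cs.drop f.toNat).length := hpre.length_le
        have hdl : (cs.drop f.toNat).length = cs.length - f.toNat := by simp
        have hflt : f.toNat < cs.length := by omega
        have hstartf : start ≤ f.toNat := by omega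
        have hpf : (fun s => decide (start ≤ s) && sub.isPrefixOf (cs.drop s)) f.toNat = true := by
          simp [hstartf, List.isPrefixOf_iff_prefix, hpre]
        have hmin' : ∀ s, (decide (start ≤ s) && sub.isPrefixOf (cs.drop s)) = true → f.toNat ≤ s := by
          intro s hp
          simp only [Bool.and_eq_true, decide_eq_true_eq, List.isPrefixOf_iff_prefix] at hp
          by_contra hlt
          exact hmin s hp.1 (by omega) hp.2
        rw [filter_range_eq_cons cs.length f.toNat _ hflt hpf hmin']
        rw [dsPick]
        by_cases hc : count + 1 = occ
        · rw [if_pos hc, if_pos hc]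
          omega
        · rw [if_neg hc, if_neg hc]
          have hrw : (List.range cs.length).filter
              (fun s => (decide (start ≤ s) && sub.isPrefixOf (cs.drop s)) && decide (f.toNat < s)) =
              (List.range cs.length).filter
              (fun s => decide (f.toNat + 1 ≤ s) && sub.isPrefixOf (cs.drop s)) := by
            refine List.filter_congr ?_
            intro s _
            by_cases hp : sub.isPrefixOf (cs.drop s) = true
            · simp only [hp, Bool.and_true]
              by_cases h1 : f.toNat < s
              · have h2 : start ≤ s := by omega
                have h3 : f.toNat + 1 ≤ s := by omega
                simp [h1, h2, h3]
              · have h3 : ¬ (f.toNat + 1 ≤ s) := by omega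
                simp [h1, h3]
            · simp [Bool.eq_false_iff.mpr hp]
          rw [hrw]
          exact ih (f.toNat + 1) (count + 1) (by omega) (by omega)
    · rw [dif_neg h, hend start (by omega)]
      rfl

lemma inner_no_complete (sub : List Char) (m : Nat) (occ : Int) (pos : Nat) (ch : Char) :
    ∀ (todo : List Nat) (count : Int) (nxt : List Nat),
    (∀ s ∈ todo, sub.getD (pos - s) ' ' = ch → pos - s + 1 ≠ m) →
    dsInner sub m occ pos ch count todo nxt =
      (none, count, nxt ++ todo.filter (fun s => decide (sub.getD (pos - s) ' ' = ch))) := by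
  intro todo
  induction todo with
  | nil => intro count nxt _; simp [dsInner]
  | cons s rest ih =>
    intro count nxt h
    by_cases hc : sub.getD (pos - s) ' ' = ch
    · have hs : pos - s + 1 ≠ m := h s List.mem_cons_self hc
      simp only [dsInner, if_pos hc, if_neg hs]
      rw [ih count (nxt ++ [s]) (fun a ha => h a (List.mem_cons_of_mem _ ha))]
      rw [List.filter_cons, if_pos (decide_eq_true hc)]
      simp
    · simp only [dsInner, if_neg hc]
      rw [ih count nxt (fun a ha => h a (List.mem_cons_of_mem _ ha))]
      rw [List.filter_cons, if_neg (by simpa using hc)]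

-- one-character extension of a partial match, as a Bool identity
lemma step_partial (cs sub : List Char) (m pos s : Nat) (ch : Char)
    (hm : sub.length = m) (hs : s ≤ pos) (hch : cs[pos]? = some ch) :
    (decide (pos + 1 - s < m) && (sub.take (pos + 1 - s)).isPrefixOf (cs.drop s))
    = ((decide (pos - s < m) && (sub.take (pos - s)).isPrefixOf (cs.drop s))
        && decide (sub.getD (pos - s) ' ' = ch) && decide (pos - s + 1 ≠ m)) := by
  set k := pos - s with hk
  have hpos1 : pos + 1 - s = k + 1 := by omega
  rw [hpos1, Bool.eq_iff_iff]
  simp only [Bool.and_eq_true, decide_eq_true_eq, List.isPrefixOf_iff_prefix]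
  by_cases hkm : k < m
  · have hksub : k < sub.length := by omega
    have hiff := prefix_take_succ_iff (cs.drop s) sub k hksub
    have hdk : (cs.drop s)[k]? = cs[pos]? := by rw [List.getElem?_drop]; congr 1; omega
    have hsubk : sub[k]? = some (sub.getD k ' ') := by
      rw [List.getD_eq_getElem?_getD, List.getElem?_eq_getElem hksub]; rfl
    constructor
    · rintro ⟨h1, h2⟩
      have := hiff.mp h2
      refine ⟨⟨⟨hkm, this.1⟩, ?_⟩, by omega⟩
      have := this.2
      rw [hdk, hch, hsubk] at this
      exact (Option.some_injective _ this).symm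
    · rintro ⟨⟨⟨_, h2⟩, h3⟩, h4⟩
      refine ⟨by omega, hiff.mpr ⟨h2, ?_⟩⟩
      rw [hdk, hch, hsubk, h3]
  · constructor
    · rintro ⟨h1, _⟩; omega
    · rintro ⟨⟨⟨h1, _⟩, _⟩, _⟩; omega

lemma auto_eq (cs sub : List Char) (m : Nat) (hm : sub.length = m) (hm1 : 1 ≤ m) (occ : Int) :
    ∀ (rest : List Char) (pos : Nat) (count : Int), rest = cs.drop pos → pos ≤ cs.length →
    dsAuto sub m occ count
      ((List.range pos).filter
        (fun s => decide (pos - s < m) && (sub.take (pos - s)).isPrefixOf (cs.drop s)))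
      pos rest =
    dsPick occ count ((List.range cs.length).filter
      (fun s => decide (pos < s + m) && sub.isPrefixOf (cs.drop s))) := by
  intro rest
  induction rest with
  | nil =>
    intro pos count hdrop hle
    have hpos : pos = cs.length := by
      have := congrArg List.length hdrop
      simp at this
      omega
    have hnil : (List.range cs.length).filter
        (fun s => decide (pos < s + m) && sub.isPrefixOf (cs.drop s)) = [] := by
      rw [List.filter_eq_nil_iff]
      intro a ha hpa
      have haa := List.mem_range.mp ha
      simp only [Bool.and_eq_true, decide_eq_true_eq, List.isPrefixOf_iff_prefix] at hpa
      have := hpa.2.length_le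
      simp [List.length_drop] at this
      omega
    rw [hnil]
    rfl
  | cons ch rest' ih =>
    intro pos count hdrop hle
    have hlen : rest'.length + 1 = cs.length - pos := by
      have := congrArg List.length hdrop
      simpa using this
    have hpos : pos < cs.length := by omega
    have hch : cs[pos]? = some ch := by
      have h0 : (cs.drop pos)[0]? = cs[pos + 0]? := List.getElem?_drop
      rw [← hdrop] at h0
      simpa using h0.symm
    have hrest' : rest' = cs.drop (pos + 1) := by
      have : cs.drop (pos + 1) = List.drop 1 (cs.drop pos) := by rw [List.drop_drop]
      rw [← hdrop] at this
      simpa using this.symm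
    -- the frontier after appending pos
    have h0m : 0 < m := hm1
    have hPpos : (fun s => decide (pos - s < m) && (sub.take (pos - s)).isPrefixOf (cs.drop s)) pos = true := by
      simp [h0m]
    have hact : ((List.range pos).filter
          (fun s => decide (pos - s < m) && (sub.take (pos - s)).isPrefixOf (cs.drop s))) ++ [pos]
        = (List.range (pos + 1)).filter
          (fun s => decide (pos - s < m) && (sub.take (pos - s)).isPrefixOf (cs.drop s)) := by
      rw [List.range_succ, List.filter_append]
      simp [List.filter, h0m]
    -- no-completion fact in propositional form
    by_cases hC : m ≤ pos + 1 ∧ sub <+: cs.drop (pos + 1 - m)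
    · -- a match completes at pos, at frontier head q
      obtain ⟨hm2, hfull⟩ := hC
      have hpq : pos - (pos + 1 - m) = m - 1 := by omega
      have hchq : sub.getD (pos - (pos + 1 - m)) ' ' = ch := by
        have hg := (List.prefix_iff_getElem?.mp hfull) (m - 1) (by omega)
        have hdq : (cs.drop (pos + 1 - m))[m - 1]? = cs[pos]? := by rw [List.getElem?_drop]; congr 1; omega
        rw [hdq, hch] at hg
        rw [hpq, List.getD_eq_getElem?_getD, List.getElem?_eq_getElem (by omega)]
        simpa using (Option.some_injective _ hg).symm
      have hPq : (fun s => decide (pos - s < m) && (sub.take (pos - s)).isPrefixOf (cs.drop s)) (pos + 1 - m) = true := by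
        simp only [Bool.and_eq_true, decide_eq_true_eq, List.isPrefixOf_iff_prefix]
        exact ⟨by omega, hpq ▸ (List.take_prefix (m - 1) sub).trans hfull⟩
      have hminq : ∀ s, (decide (pos - s < m) && (sub.take (pos - s)).isPrefixOf (cs.drop s)) = true → (pos + 1 - m) ≤ s := by
        intro s hp
        simp only [Bool.and_eq_true, decide_eq_true_eq] at hp
        omega
      have hact2 := filter_range_eq_cons (pos + 1) (pos + 1 - m) _ (by omega) hPq hminq
      -- F_pos = (pos + 1 - m) :: F_{pos+1}
      have hqlen : (pos + 1 - m) < cs.length := by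
        have := hfull.length_le
        simp [List.length_drop] at this
        omega
      have hQq : (fun s => decide (pos < s + m) && sub.isPrefixOf (cs.drop s)) (pos + 1 - m) = true := by
        simp only [Bool.and_eq_true, decide_eq_true_eq, List.isPrefixOf_iff_prefix]
        exact ⟨by omega, hfull⟩
      have hminQ : ∀ s, (decide (pos < s + m) && sub.isPrefixOf (cs.drop s)) = true → (pos + 1 - m) ≤ s := by
        intro s hp
        simp only [Bool.and_eq_true, decide_eq_true_eq] at hp
        omega
      have hF := filter_range_eq_cons cs.length (pos + 1 - m) _ hqlen hQq hminQ
      have hFrest : (List.range cs.length).filter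
            (fun s => (decide (pos < s + m) && sub.isPrefixOf (cs.drop s)) && decide ((pos + 1 - m) < s))
          = (List.range cs.length).filter
            (fun s => decide (pos + 1 < s + m) && sub.isPrefixOf (cs.drop s)) := by
        refine List.filter_congr ?_
        intro s _
        by_cases hp : sub.isPrefixOf (cs.drop s) = true
        · simp only [hp, Bool.and_true]
          rw [Bool.eq_iff_iff]
          simp only [Bool.and_eq_true, decide_eq_true_eq]
          omega
        · simp [Bool.eq_false_iff.mpr hp]
      -- the rest of the frontier cannot complete
      have hnoc : ∀ s ∈ (List.range (pos + 1)).filter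
            (fun s => (decide (pos - s < m) && (sub.take (pos - s)).isPrefixOf (cs.drop s)) && decide ((pos + 1 - m) < s)),
          sub.getD (pos - s) ' ' = ch → pos - s + 1 ≠ m := by
        intro s hsmem _
        obtain ⟨hsr, hsp⟩ := List.mem_filter.mp hsmem
        have hsr' := List.mem_range.mp hsr
        simp only [Bool.and_eq_true, decide_eq_true_eq] at hsp
        omega
      -- new frontier = survivors
      have hsurv : ((List.range (pos + 1)).filter
              (fun s => (decide (pos - s < m) && (sub.take (pos - s)).isPrefixOf (cs.drop s)) && decide ((pos + 1 - m) < s))).filter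
            (fun s => decide (sub.getD (pos - s) ' ' = ch))
          = (List.range (pos + 1)).filter
            (fun s => decide (pos + 1 - s < m) && (sub.take (pos + 1 - s)).isPrefixOf (cs.drop s)) := by
        rw [List.filter_filter]
        refine List.filter_congr ?_
        intro s hs
        have hs' : s ≤ pos := by have := List.mem_range.mp hs; omega
        rw [step_partial cs sub m pos s ch hm hs' hch]
        simp only [Bool.and_assoc]
        rw [Bool.eq_iff_iff]
        simp only [Bool.and_eq_true, decide_eq_true_eq]
        constructor
        · rintro ⟨hce, hlt, hpre, hqs⟩
          exact ⟨hlt, hpre, hce, by omega⟩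
        · rintro ⟨hlt, hpre, hce, hne⟩
          exact ⟨hce, hlt, hpre, by omega⟩
      -- unfold one automaton step
      have hchq' : sub.getD (m - 1) ' ' = ch := by rw [← hpq]; exact hchq
      by_cases hcnt : count + 1 = occ
      · rw [hF]
        simp only [dsAuto]
        rw [hact, hact2]
        simp only [dsInner, hpq]
        rw [if_pos hchq', if_pos (show m - 1 + 1 = m by omega), if_pos hcnt]
        simp only [dsPick, if_pos hcnt]
      · have hfinal : dsAuto sub m occ (count + 1)
            ([] ++ ((List.range (pos + 1)).filter
              (fun s => (decide (pos - s < m) && (sub.take (pos - s)).isPrefixOf (cs.drop s)) && decide ((pos + 1 - m) < s))).filter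
              (fun s => decide (sub.getD (pos - s) ' ' = ch)))
            (pos + 1) rest' =
            dsPick occ (count + 1) ((List.range cs.length).filter
              (fun s => decide (pos + 1 < s + m) && sub.isPrefixOf (cs.drop s))) := by
          rw [List.nil_append, hsurv]
          exact ih (pos + 1) (count + 1) hrest' (by omega)
        rw [hF]
        simp only [dsPick, if_neg hcnt]
        rw [hFrest]
        simp only [dsAuto]
        rw [hact, hact2]
        simp only [dsInner, hpq]
        rw [if_pos hchq', if_pos (show m - 1 + 1 = m by omega), if_neg hcnt]
        rw [inner_no_complete sub m occ pos ch _ (count + 1) [] hnoc]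
        exact hfinal
    · -- no match completes at pos
      have hnc : ∀ s, s ≤ pos →
          (decide (pos - s < m) && (sub.take (pos - s)).isPrefixOf (cs.drop s)) = true →
          sub.getD (pos - s) ' ' = ch → pos - s + 1 ≠ m := by
        intro s hs hp hcheq heq
        apply hC
        have hsq : s = pos + 1 - m := by
          simp only [Bool.and_eq_true, decide_eq_true_eq] at hp
          omega
        have hm2 : m ≤ pos + 1 := by omega
        refine ⟨hm2, ?_⟩
        simp only [Bool.and_eq_true, decide_eq_true_eq, List.isPrefixOf_iff_prefix] at hp
        have hksub : pos - s < sub.length := by omega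
        have hext := (prefix_take_succ_iff (cs.drop s) sub (pos - s) hksub).mpr
          ⟨hp.2, by
            rw [List.getElem?_drop, show s + (pos - s) = pos by omega, hch,
              List.getElem?_eq_getElem hksub]
            rw [List.getD_eq_getElem?_getD, List.getElem?_eq_getElem hksub] at hcheq
            simpa using hcheq.symm⟩
        rw [heq, ← hm, List.take_length] at hext
        exact hsq ▸ hext
      have hnoc : ∀ s ∈ (List.range (pos + 1)).filter
            (fun s => decide (pos - s < m) && (sub.take (pos - s)).isPrefixOf (cs.drop s)),
          sub.getD (pos - s) ' ' = ch → pos - s + 1 ≠ m := by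
        intro s hsmem hcheq
        obtain ⟨hsr, hsp⟩ := List.mem_filter.mp hsmem
        exact hnc s (by have := List.mem_range.mp hsr; omega) hsp hcheq
      have hsurv : ((List.range (pos + 1)).filter
              (fun s => decide (pos - s < m) && (sub.take (pos - s)).isPrefixOf (cs.drop s))).filter
            (fun s => decide (sub.getD (pos - s) ' ' = ch))
          = (List.range (pos + 1)).filter
            (fun s => decide (pos + 1 - s < m) && (sub.take (pos + 1 - s)).isPrefixOf (cs.drop s)) := by
        rw [List.filter_filter]
        refine List.filter_congr ?_
        intro s hs
        have hs' : s ≤ pos := by have := List.mem_range.mp hs; omega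
        rw [step_partial cs sub m pos s ch hm hs' hch]
        simp only [Bool.and_assoc]
        rw [Bool.eq_iff_iff]
        simp only [Bool.and_eq_true, decide_eq_true_eq]
        constructor
        · rintro ⟨hce, hlt, hpre⟩
          refine ⟨hlt, hpre, hce, ?_⟩
          exact hnc s hs' (by simp only [Bool.and_eq_true, decide_eq_true_eq]; exact ⟨hlt, hpre⟩) hce
        · rintro ⟨hlt, hpre, hce, _⟩
          exact ⟨hce, hlt, hpre⟩
      have hFsame : (List.range cs.length).filter
            (fun s => decide (pos < s + m) && sub.isPrefixOf (cs.drop s))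
          = (List.range cs.length).filter
            (fun s => decide (pos + 1 < s + m) && sub.isPrefixOf (cs.drop s)) := by
        refine List.filter_congr ?_
        intro s _
        by_cases hp : sub.isPrefixOf (cs.drop s) = true
        · simp only [hp, Bool.and_true]
          rw [Bool.eq_iff_iff]
          simp only [decide_eq_true_eq]
          constructor
          · intro h1
            rcases Nat.lt_or_ge (pos + 1) (s + m) with h2 | h2
            · exact h2
            · exfalso
              apply hC
              have hsm : s + m = pos + 1 := by omega
              refine ⟨by omega, ?_⟩
              have : s = pos + 1 - m := by omega
              rw [← this]
              exact (List.isPrefixOf_iff_prefix).mp hp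
          · omega
        · simp [Bool.eq_false_iff.mpr hp]
      have hfinal : dsAuto sub m occ count
          ([] ++ ((List.range (pos + 1)).filter
            (fun s => decide (pos - s < m) && (sub.take (pos - s)).isPrefixOf (cs.drop s))).filter
            (fun s => decide (sub.getD (pos - s) ' ' = ch)))
          (pos + 1) rest' =
          dsPick occ count ((List.range cs.length).filter
            (fun s => decide (pos + 1 < s + m) && sub.isPrefixOf (cs.drop s))) := by
        rw [List.nil_append, hsurv]
        exact ih (pos + 1) count hrest' (by omega)
      rw [hFsame]
      simp only [dsAuto]
      rw [hact, inner_no_complete sub m occ pos ch _ count [] hnoc]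
      exact hfinal

-- ===== VERDICT (by name: the statement is the Claim_ definition above) =====
theorem ds_index_spec : Claim_equal_ds_index := by
  intro string substring occurrence _
  unfold Spec_ds_index
  cases string with
  | none => rfl
  | some s =>
   cases substring with
   | none => rfl
   | some sub =>
    simp only [ds_index, ds_index_alt]
    by_cases hocc : occurrence ≤ 0
    · simp [hocc]
    · rw [if_neg hocc, if_neg hocc]
      have hguards : (PySem.Str.len sub = 0) ↔ (sub.toList.length = 0) := by
        simp [PySem.Str.len_eq]
      by_cases hlen : sub.toList.length = 0
      · rw [if_pos (hguards.mpr hlen), if_pos hlen]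
      · rw [if_neg (fun h => hlen (hguards.mp h)), if_neg hlen]
        have hsub : sub.toList ≠ [] := fun h => hlen (by simp [h])
        have hm1 : 1 ≤ sub.toList.length := by
          cases h : sub.toList with
          | nil => exact absurd h hsub
          | cons a t => simp
        set cs := s.toList
        have hA := findLoop_eq cs sub.toList hsub occurrence cs.length 0 0 (by omega) (Nat.zero_le _)
        have hB := auto_eq cs sub.toList sub.toList.length rfl hm1 occurrence cs 0 0
          (List.drop_zero (l := cs)).symm (Nat.zero_le _)
        have hact0 : ((List.range 0).filter
            (fun t => decide (0 - t < sub.toList.length) &&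
              (sub.toList.take (0 - t)).isPrefixOf (cs.drop t))) = ([] : List Nat) := by
          simp
        rw [hact0] at hB
        have hsame : (List.range cs.length).filter
              (fun t => decide (0 ≤ t) && sub.toList.isPrefixOf (cs.drop t))
            = (List.range cs.length).filter
              (fun t => decide (0 < t + sub.toList.length) && sub.toList.isPrefixOf (cs.drop t)) := by
          refine List.filter_congr ?_
          intro t _
          have h1 : (0 : Nat) ≤ t := Nat.zero_le t
          have h3 : 0 < sub.length := by simpa using hm1
          simp [h1, h3]
        rw [hA, hB, hsame]
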